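-- pv_equiv track=rewrite | github.com/jsh/streaks2 | src/expt/streaks.py | find_streaks
-- ===== SOURCE A (Python) =====
-- def find_streaks(lst):
--     """
--     Decompose lst into streaks. A streak is a sequence of integers, all of which are are larger than the initial integer of the streak.
--
--     Args:
--         lst (list): A list of distinct integers.
--
--     Returns:
--         list: A list of sublists, where each sublist is a streak.
--
--     Examples:
--         find_streaks([1]) -> [[1]]
--         find_streaks([1, 2, 3]) -> [[1, 2, 3]]
--         find_streaks([3, 2, 1]) -> [[3], [2], [1]]
--         find_streaks([2, 1, 3]) -> [[2], [1, 3]]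
--     """
--     if not lst:
--         return []
--
--     streaks = []
--     current_streak = [lst[0]]
--
--     for i in range(1, len(lst)):
--         if lst[i] >= current_streak[0]:
--             current_streak.append(lst[i])
--         else:
--             streaks.append(current_streak)
--             current_streak = [lst[i]]
--
--     streaks.append(current_streak)
--     return streaks
-- ===== SOURCE B (Python) =====
-- def find_streaks(lst):
--     n = len(lst)
--     if n == 0:
--         return []
--     # One pass collecting streak boundary indices (positions of new running minima),
--     # then materialize each streak as a slice between consecutive boundaries.
--     bounds = [0]
--     m = lst[0]
--     for i in range(1, n):
--         if lst[i] < m: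
--             bounds.append(i)
--             m = lst[i]
--     bounds.append(n)
--     return [lst[a:b] for a, b in zip(bounds, bounds[1:])]
-- ===== Notes on version B (the rewrite author's own statement) =====
-- stated objective: alternative
-- what changed: B first collects streak boundary indices (the positions of new running minima) keeping only an index list and the current minimum, then builds all streaks at once by slicing between consecutive boundaries, instead of A's growing a current-streak list element by element and flushing it into the result.
import Mathlib
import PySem

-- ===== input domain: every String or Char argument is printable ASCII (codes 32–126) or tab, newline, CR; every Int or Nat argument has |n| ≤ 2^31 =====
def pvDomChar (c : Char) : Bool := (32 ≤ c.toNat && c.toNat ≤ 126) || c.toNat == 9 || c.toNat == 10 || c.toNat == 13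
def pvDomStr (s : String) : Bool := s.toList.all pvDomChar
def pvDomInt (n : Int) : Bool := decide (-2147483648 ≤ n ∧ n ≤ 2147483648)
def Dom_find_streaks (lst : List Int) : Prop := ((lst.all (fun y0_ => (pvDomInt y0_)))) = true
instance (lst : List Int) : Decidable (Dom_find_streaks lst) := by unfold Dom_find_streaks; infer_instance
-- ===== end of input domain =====

-- B builds a streak-boundary index list in one pass and slices between consecutive
-- boundaries, instead of A's per-element growing of a current-streak list (alternative).

-- ===== PORT A =====
-- loop body of A: lst[i] >= current_streak[0] appends, else flushes the streak
def stepA (lst : List Int) (st : List (List Int) × List Int) (i : Int) : List (List Int) × List Int :=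
  let x := PySem.List.pyGetD lst i 0
  if PySem.List.pyGetD st.2 0 0 ≤ x then (st.1, st.2 ++ [x]) else (st.1 ++ [st.2], [x])

def find_streaks (lst : List Int) : List (List Int) :=
  if lst = [] then []
  else
    let st := (PySem.List.pyRange 1 (lst.length : Int) 1).foldl (stepA lst)
      ([], [PySem.List.pyGetD lst 0 0])
    st.1 ++ [st.2]

-- ===== PORT B =====
-- loop body of B: a new running minimum starts a streak boundary
def stepB (lst : List Int) (st : List Int × Int) (i : Int) : List Int × Int :=
  if PySem.List.pyGetD lst i 0 < st.2 then (st.1 ++ [i], PySem.List.pyGetD lst i 0) else st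

def find_streaks_alt (lst : List Int) : List (List Int) :=
  let n : Int := lst.length
  if n = 0 then []
  else
    let st := (PySem.List.pyRange 1 n 1).foldl (stepB lst) ([0], PySem.List.pyGetD lst 0 0)
    let bounds := st.1 ++ [n]
    (bounds.zip (PySem.List.slice bounds (some 1) none)).map
      (fun ab => PySem.List.slice lst (some ab.1) (some ab.2))

-- ===== PRECONDITION & SPEC =====
def Spec_find_streaks (lst : List Int) (out : List (List Int)) : Prop := out = find_streaks_alt lst
instance (lst : List Int) (out : List (List Int)) : Decidable (Spec_find_streaks lst out) := by unfold Spec_find_streaks; infer_instance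

-- ===== CLAIM (what is proved, stated in full; the proofs are below) =====
def Claim_equal_find_streaks : Prop := ∀ (lst : List Int), Dom_find_streaks lst → Spec_find_streaks lst (find_streaks lst)

-- ===== LEMMAS AND PROOFS =====

-- the slices between consecutive elements of a boundary list
def slicesOf (lst : List Int) (bounds : List Int) : List (List Int) :=
  (bounds.zip bounds.tail).map (fun ab => PySem.List.slice lst (some ab.1) (some ab.2))

lemma zip_tail_concat : ∀ (bs : List Int) (a t : Int), bs.getLast? = some a →
    (bs ++ [t]).zip ((bs ++ [t]).tail) = bs.zip bs.tail ++ [(a, t)]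
  | [], a, t, h => by simp at h
  | [x], a, t, h => by simp_all
  | x :: y :: bs, a, t, h => by
    have ih := zip_tail_concat (y :: bs) a t (by simpa using h)
    simpa using ih

lemma slicesOf_concat (lst : List Int) (bs : List Int) (a t : Int) (h : bs.getLast? = some a) :
    slicesOf lst (bs ++ [t]) = slicesOf lst bs ++ [PySem.List.slice lst (some a) (some t)] := by
  unfold slicesOf
  rw [zip_tail_concat bs a t h]
  simp

lemma slice_extend (xs : List Int) (a j : Int) (ha : 0 ≤ a) (haj : a ≤ j) (hj : j < (xs.length : Int)) :
    PySem.List.slice xs (some a) (some (j + 1)) =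
      PySem.List.slice xs (some a) (some j) ++ [PySem.List.pyGetD xs j 0] := by
  have h0j : (0:Int) ≤ j := le_trans ha haj
  have hJ : j.toNat < xs.length := by omega
  rw [PySem.List.slice_toNat xs ha h0j, PySem.List.slice_toNat xs ha (by omega),
      PySem.List.pyGetD_eq_getElem xs 0 h0j hj]
  have h1 : (j + 1).toNat - a.toNat = (j.toNat - a.toNat) + 1 := by omega
  rw [h1, List.take_add_one]
  congr 1
  have : (List.drop a.toNat xs)[j.toNat - a.toNat]? = some xs[j.toNat] := by
    rw [List.getElem?_drop]
    have : a.toNat + (j.toNat - a.toNat) = j.toNat := by omega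
    rw [this, List.getElem?_eq_getElem hJ]
  simp [this]

lemma slice_single (xs : List Int) (j : Int) (hj0 : 0 ≤ j) (hj : j < (xs.length : Int)) :
    PySem.List.slice xs (some j) (some (j + 1)) = [PySem.List.pyGetD xs j 0] := by
  have := slice_extend xs j j hj0 le_rfl hj
  rw [this, PySem.List.slice_toNat xs hj0 hj0]
  simp

lemma head_slice (xs : List Int) (a j : Int) (ha : 0 ≤ a) (haj : a < j) (hj : j ≤ (xs.length : Int)) :
    PySem.List.pyGetD (PySem.List.slice xs (some a) (some j)) 0 0 = PySem.List.pyGetD xs a 0 := by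
  have h0j : (0:Int) ≤ j := by omega
  have hA : a.toNat < xs.length := by omega
  rw [PySem.List.slice_toNat xs ha h0j,
      PySem.List.pyGetD_eq_getElem xs 0 ha (by omega)]
  have hlen : 0 < (List.take (j.toNat - a.toNat) (List.drop a.toNat xs)).length := by
    simp; omega
  rw [PySem.List.pyGetD_eq_getElem _ 0 le_rfl (by exact_mod_cast hlen)]
  simp [List.getElem_take, List.getElem_drop]

lemma loop_inv (lst : List Int) :
    ∀ (k : Nat) (j a : Int) (S : List (List Int)) (bs : List Int),
      k = ((lst.length : Int) - j).toNat →
      1 ≤ j → j ≤ (lst.length : Int) → 0 ≤ a → a < j →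
      bs.getLast? = some a → S = slicesOf lst bs →
      (let r := (PySem.List.pyRange j (lst.length : Int) 1).foldl (stepA lst)
          (S, PySem.List.slice lst (some a) (some j));
        r.1 ++ [r.2]) =
      slicesOf lst
        (((PySem.List.pyRange j (lst.length : Int) 1).foldl (stepB lst)
            (bs, PySem.List.pyGetD lst a 0)).1 ++ [(lst.length : Int)]) := by
  intro k
  induction k with
  | zero =>
    intro j a S bs hk h1 h2 ha haj hlast hS
    have hj : j = (lst.length : Int) := by omega
    subst hj
    rw [PySem.List.pyRange_one_eq_nil le_rfl]
    simp only [List.foldl_nil]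
    rw [slicesOf_concat lst bs a _ hlast, hS]
  | succ k ih =>
    intro j a S bs hk h1 h2 ha haj hlast hS
    have hjlt : j < (lst.length : Int) := by omega
    rw [PySem.List.pyRange_one_cons hjlt]
    simp only [List.foldl_cons]
    have hA : stepA lst (S, PySem.List.slice lst (some a) (some j)) j =
        if PySem.List.pyGetD lst a 0 ≤ PySem.List.pyGetD lst j 0 then
          (S, PySem.List.slice lst (some a) (some (j+1)))
        else (S ++ [PySem.List.slice lst (some a) (some j)], PySem.List.slice lst (some j) (some (j+1))) := by
      unfold stepA
      rw [head_slice lst a j ha haj h2]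
      split_ifs with h
      · rw [slice_extend lst a j ha (le_of_lt haj) hjlt]; simp [h]
      · rw [slice_single lst j (by omega) hjlt]; simp [h]
    rw [hA]
    by_cases hc : PySem.List.pyGetD lst a 0 ≤ PySem.List.pyGetD lst j 0
    · rw [if_pos hc]
      have hB : stepB lst (bs, PySem.List.pyGetD lst a 0) j = (bs, PySem.List.pyGetD lst a 0) := by
        unfold stepB; rw [if_neg (by simpa using hc)]
      rw [hB]
      exact ih (j+1) a S bs (by omega) (by omega) (by omega) ha (by omega) hlast hS
    · rw [if_neg hc]
      have hB : stepB lst (bs, PySem.List.pyGetD lst a 0) j = (bs ++ [j], PySem.List.pyGetD lst j 0) := by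
        unfold stepB; rw [if_pos (by simpa using not_le.mp hc)]
      rw [hB]
      exact ih (j+1) j (S ++ [PySem.List.slice lst (some a) (some j)]) (bs ++ [j])
        (by omega) (by omega) (by omega) (by omega) (by omega)
        List.getLast?_concat
        (by rw [slicesOf_concat lst bs a j hlast, hS])

-- ===== VERDICT (by name: the statement is the Claim_ definition above) =====
theorem find_streaks_spec : Claim_equal_find_streaks := by
  intro lst _
  unfold Spec_find_streaks find_streaks find_streaks_alt
  cases lst with
  | nil => simp
  | cons y ys =>
    have hne : (y :: ys) ≠ ([] : List Int) := by simp
    have hlen : (0:Int) < ((y :: ys).length : Int) := by simp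
    rw [if_neg hne, if_neg (by omega : ¬ (((y :: ys).length : Int)) = 0)]
    simp only [PySem.List.slice_from_one]
    have h0 : [PySem.List.pyGetD (y :: ys) 0 0] =
        PySem.List.slice (y :: ys) (some 0) (some 1) := by
      have := slice_single (y :: ys) 0 le_rfl hlen
      simpa using this.symm
    have main := loop_inv (y :: ys) (((y :: ys).length : Int) - 1).toNat 1 0 [] [0]
      rfl le_rfl (by omega) le_rfl (by omega) rfl (by simp [slicesOf])
    simp only [h0]
    rw [main]
    rfl
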